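-- pv_equiv track=rewrite | github.com/STMhub/scikit-learn | examples/nilearn/plot_brain_dict_learning.py | bundle_up
-- ===== SOURCE A (Python) =====
-- def bundle_up(X, batch_size):
--     X = [img for Xs in X for img in Xs]
--     n_files = len(X)
--     batch_size = min(n_files, batch_size)
--     tmp = []
--     for i in range(n_files // batch_size):
--         tmp.append(X[i * batch_size: (i + 1) * batch_size])
--     remainder = X[(i + 1) * batch_size:]
--     if len(remainder):
--         tmp.append(remainder)
--     return tmp
-- ===== SOURCE B (Python) =====
-- def bundle_up(X, batch_size):
--     cap = min(sum(len(xs) for xs in X), batch_size)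
--     out = []
--     cur = []
--     for xs in X:
--         for img in xs:
--             cur.append(img)
--             if len(cur) == cap:
--                 out.append(cur)
--                 cur = []
--     if cur:
--         out.append(cur)
--     return out
-- ===== Notes on version B (the rewrite author's own statement) =====
-- stated objective: alternative
-- what changed: A flattens into one list and then slices it into batches by index arithmetic (floor-division batch count plus a separate remainder branch); B never builds the flattened list or slices at all: it streams the nested elements once, growing a current batch and emitting it whenever it reaches capacity, appending the final partial batch.
import Mathlib
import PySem

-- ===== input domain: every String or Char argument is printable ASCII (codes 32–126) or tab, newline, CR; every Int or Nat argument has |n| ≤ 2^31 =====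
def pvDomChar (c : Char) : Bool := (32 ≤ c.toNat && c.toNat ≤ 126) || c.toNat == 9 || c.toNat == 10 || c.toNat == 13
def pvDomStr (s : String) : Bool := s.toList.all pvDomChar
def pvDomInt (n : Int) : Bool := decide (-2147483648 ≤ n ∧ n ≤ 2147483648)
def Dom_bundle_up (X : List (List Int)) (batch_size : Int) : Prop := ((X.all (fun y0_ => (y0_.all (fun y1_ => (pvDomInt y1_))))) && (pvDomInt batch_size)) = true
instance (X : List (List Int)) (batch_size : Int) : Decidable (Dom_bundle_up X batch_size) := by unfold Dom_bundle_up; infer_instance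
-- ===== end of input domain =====

-- B streams the nested elements once with a capacity-bounded accumulator instead of
-- flattening and slicing by index arithmetic (objective: alternative).

-- ===== PORT A =====
-- the for-loop carries two pieces of state: the accumulated tmp and the loop variable i
-- (read after the loop by `remainder = X[(i + 1) * batch_size:]`); if the loop never ran,
-- Python raises NameError there — that input is outside Pre_ and the port returns s.1.
def bundle_up (X : List (List Int)) (batch_size : Int) : List (List Int) :=
  let Xf := X.flatMap id
  let n_files : Int := Xf.length
  let bs := min n_files batch_size
  let s := (PySem.List.pyRange 0 (PySem.Int.floordiv n_files bs) 1).foldl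
    (fun (s : List (List Int) × Option Int) i =>
      (s.1 ++ [PySem.List.slice Xf (some (i * bs)) (some ((i + 1) * bs))], some i))
    ([], none)
  match s.2 with
  | none => s.1
  | some i =>
    let remainder := PySem.List.slice Xf (some ((i + 1) * bs)) none
    if remainder.length ≠ 0 then s.1 ++ [remainder] else s.1

-- ===== PORT B =====
def bundle_up_alt (X : List (List Int)) (batch_size : Int) : List (List Int) :=
  let cap : Int := min ((X.map (fun xs => (xs.length : Int))).sum) batch_size
  let s := X.foldl
    (fun (s : List (List Int) × List Int) xs =>
      xs.foldl
        (fun (s : List (List Int) × List Int) img =>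
          let cur := s.2 ++ [img]
          if (cur.length : Int) = cap then (s.1 ++ [cur], []) else (s.1, cur))
        s)
    ([], [])
  if s.2 ≠ [] then s.1 ++ [s.2] else s.1

-- ===== PRECONDITION & SPEC =====
-- Pre_ excludes exactly the inputs on which A raises: an empty flattened list (batch_size
-- becomes 0, ZeroDivisionError) and batch_size < 1 (empty loop, NameError on `i`).
def Pre_bundle_up (X : List (List Int)) (batch_size : Int) : Prop :=
  X.flatMap id ≠ [] ∧ 1 ≤ batch_size
instance (X : List (List Int)) (batch_size : Int) : Decidable (Pre_bundle_up X batch_size) := by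
  unfold Pre_bundle_up; infer_instance

def pvWitness_bundle_up : List (List Int) × Int := ([[1, 2], [3]], 2)

def Spec_bundle_up (X : List (List Int)) (batch_size : Int) (out : List (List Int)) : Prop := out = bundle_up_alt X batch_size
instance (X : List (List Int)) (batch_size : Int) (out : List (List Int)) : Decidable (Spec_bundle_up X batch_size out) := by unfold Spec_bundle_up; infer_instance

-- ===== CLAIM (what is proved, stated in full; the proofs are below) =====
def Claim_equal_bundle_up : Prop := ∀ (X : List (List Int)) (batch_size : Int), Dom_bundle_up X batch_size → Pre_bundle_up X batch_size → Spec_bundle_up X batch_size (bundle_up X batch_size)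

-- ===== LEMMAS AND PROOFS =====

-- the common specification both ports are proved equal to: recursive chunking
def chunks (c : Nat) (L : List Int) : List (List Int) :=
  if h : L = [] ∨ c = 0 then [] else L.take c :: chunks c (L.drop c)
termination_by L.length
decreasing_by
  simp only [not_or] at h
  have h1 : L.length ≠ 0 := by simpa [List.length_eq_zero_iff] using h.1
  simp [List.length_drop]; omega

theorem chunks_nil (c : Nat) : chunks c [] = [] := by rw [chunks]; simp

theorem chunks_cons (c : Nat) (L : List Int) (hc : c ≠ 0) (hL : L ≠ []) :
    chunks c L = L.take c :: chunks c (L.drop c) := by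
  rw [chunks, dif_neg (by simp [hL, hc])]

theorem chunks_small (c : Nat) (L : List Int) (hc : c ≠ 0) (hL : L ≠ []) (h : L.length ≤ c) :
    chunks c L = [L] := by
  rw [chunks_cons c L hc hL, List.take_of_length_le h, List.drop_eq_nil_of_le h, chunks_nil]

-- B's inner step, abstracted over the capacity
def stepB (c : Nat) (s : List (List Int) × List Int) (img : Int) : List (List Int) × List Int :=
  if ((s.2 ++ [img]).length : Int) = (c : Int) then (s.1 ++ [s.2 ++ [img]], []) else (s.1, s.2 ++ [img])

theorem foldl_flat {α β : Type} (X : List (List α)) (f : β → α → β) (init : β) :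
    X.foldl (fun s xs => xs.foldl f s) init = (X.flatMap id).foldl f init := by
  induction X generalizing init with
  | nil => rfl
  | cons x xs ih => simp [List.foldl_append, ih]

theorem sum_len (X : List (List Int)) :
    (X.map (fun xs => (xs.length : Int))).sum = ((X.flatMap id).length : Int) := by
  induction X with
  | nil => rfl
  | cons x xs ih => simp [ih]

theorem out_factor (c : Nat) (L : List Int) (out : List (List Int)) (cur : List Int) :
    L.foldl (stepB c) (out, cur) =
      (out ++ (L.foldl (stepB c) ([], cur)).1, (L.foldl (stepB c) ([], cur)).2) := by
  induction L generalizing out cur with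
  | nil => simp
  | cons a L ih =>
    simp only [List.foldl_cons, stepB]
    split_ifs with h
    · rw [ih (out ++ [cur ++ [a]]) []]
      simp only [List.nil_append]
      rw [ih [cur ++ [a]] []]
      simp
    · exact ih out (cur ++ [a])

theorem no_emit (c : Nat) (L : List Int) (out : List (List Int)) (cur : List Int)
    (h : cur.length + L.length < c) :
    L.foldl (stepB c) (out, cur) = (out, cur ++ L) := by
  induction L generalizing cur with
  | nil => simp only [List.foldl_nil, List.append_nil]
  | cons a L ih =>
    simp at h
    simp only [List.foldl_cons, stepB]
    rw [if_neg (by simp; omega)]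
    rw [ih (cur ++ [a]) (by simp; omega)]
    simp

theorem emit_chunk (c : Nat) (k : Nat) (L : List Int) (out : List (List Int)) (cur : List Int)
    (hk1 : 1 ≤ k) (hc : cur.length + k = c) (hkL : k ≤ L.length) :
    L.foldl (stepB c) (out, cur) = (L.drop k).foldl (stepB c) (out ++ [cur ++ L.take k], []) := by
  induction k generalizing L cur out with
  | zero => omega
  | succ k ih =>
    cases L with
    | nil => simp at hkL
    | cons a L =>
      simp only [List.foldl_cons, stepB]
      rcases Nat.eq_zero_or_pos k with hk0 | hkpos
      · subst hk0
        rw [if_pos (by simp; omega)]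
        simp
      · rw [if_neg (by simp; omega)]
        have := ih hkpos (cur := cur ++ [a]) (out := out) (L := L) (by simp; omega)
          (by simp at hkL ⊢; omega)
        simpa using this

-- finalize of B's fold state
def finB (s : List (List Int) × List Int) : List (List Int) :=
  if s.2 ≠ [] then s.1 ++ [s.2] else s.1

theorem B_chunks (c : Nat) (hc : 1 ≤ c) :
    ∀ L : List Int, finB (L.foldl (stepB c) ([], [])) = chunks c L := by
  intro L
  induction hn : L.length using Nat.strong_induction_on generalizing L with
  | _ n ih =>
  subst hn
  by_cases hlen : L.length < c
  · rw [no_emit c L [] [] (by simpa using hlen)]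
    by_cases hL : L = []
    · subst hL; simp [finB, chunks_nil]
    · rw [List.nil_append, chunks_small c L (by omega) hL (by omega)]
      simp [finB, hL]
  · push_neg at hlen
    have hL : L ≠ [] := by intro h; subst h; simp at hlen; omega
    rw [emit_chunk c c L [] [] hc (by simp) hlen]
    rw [out_factor]
    have hdrop : (L.drop c).length < L.length := by simp [List.length_drop]; omega
    have hrec := ih (L.drop c).length hdrop (L.drop c) rfl
    rw [chunks_cons c L (by omega) hL]
    simp only [finB, List.nil_append] at hrec ⊢
    split_ifs with h
    · rw [if_pos h] at hrec
      simp [← hrec]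
    · rw [if_neg h] at hrec
      simp [← hrec]

-- ===== A-side lemmas =====

theorem foldl_some_pyRange_one (a b : Int) (h : a < b) (init : Option Int) :
    (PySem.List.pyRange a b 1).foldl (fun (_ : Option Int) i => some i) init = some (b - 1) := by
  have hb : b = (b - 1) + 1 := by omega
  rw [hb, PySem.List.pyRange_one_succ_right (by omega), List.foldl_append]
  simp

theorem slice_shift (L : List Int) (j c : Nat) :
    PySem.List.slice L (some (((j : Int) + 1) * c)) (some (((j : Int) + 2) * c)) =
      PySem.List.slice (L.drop c) (some ((j : Int) * c)) (some (((j : Int) + 1) * c)) := by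
  have h1 : (j + 1) * c = j * c + c := by ring
  have e1 : ((j : Int) + 1) * c = (((j + 1) * c : Nat) : Int) := by push_cast; ring
  have e2 : ((j : Int) + 2) * c = ((((j + 1) * c : Nat) : Int) + ((c : Nat) : Int)) := by
    push_cast; ring
  have e3 : (j : Int) * c = ((j * c : Nat) : Int) := by push_cast; ring
  rw [e1, e2, e3]
  have e4 : (((j + 1) * c : Nat) : Int) = ((j * c : Nat) : Int) + ((c : Nat) : Int) := by
    push_cast; ring
  rw [PySem.List.slice_natCast_add]
  rw [e4, PySem.List.slice_natCast_add]
  rw [List.drop_drop]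
  congr 1
  ring

theorem map_slices_chunks (k : Nat) : ∀ (L : List Int) (c : Nat), 1 ≤ c →
    k * c ≤ L.length → L.length < k * c + c →
    ((List.range k).map (fun (j : Nat) => PySem.List.slice L (some ((j : Int) * (c : Int))) (some (((j : Int) + 1) * (c : Int))))) ++
      (if L.length = k * c then [] else [L.drop (k * c)]) = chunks c L := by
  induction k with
  | zero =>
    intro L c hc h1 h2
    simp only [List.range_zero, List.map_nil, List.nil_append, Nat.zero_mul]
    simp only [Nat.zero_mul] at h1 h2
    by_cases hL : L = []
    · subst hL; simp [chunks_nil]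
    · rw [if_neg (by simpa [List.length_eq_zero_iff] using hL)]
      rw [chunks_small c L (by omega) hL (by omega)]
      simp
  | succ k ih =>
    intro L c hc h1 h2
    have hL : L ≠ [] := by
      intro h; subst h; simp at h1; omega
    rw [chunks_cons c L (by omega) hL]
    rw [List.range_succ_eq_map, List.map_cons, List.map_map]
    simp only [Nat.cast_zero]
    have hhead : PySem.List.slice L (some ((0 : Int) * c)) (some (((0 : Int) + 1) * c)) = L.take c := by
      have e0 : ((0 : Int)) * (c : Int) = ((0 : Nat) : Int) := by push_cast; ring
      have e1 : ((0 : Int) + 1) * (c : Int) = (((0 : Nat) : Int) + ((c : Nat) : Int)) := by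
        push_cast; ring
      rw [e0, e1, PySem.List.slice_natCast_add]
      simp
    rw [hhead, List.cons_append]
    congr 1
    have hmap : (List.range k).map
        ((fun (j : Nat) => PySem.List.slice L (some ((j : Int) * (c : Int))) (some (((j : Int) + 1) * (c : Int)))) ∘ Nat.succ) =
        (List.range k).map (fun (j : Nat) => PySem.List.slice (L.drop c) (some ((j : Int) * (c : Int))) (some (((j : Int) + 1) * (c : Int)))) := by
      apply List.map_congr_left
      intro j _
      simp only [Function.comp]
      have e : ((Nat.succ j : Nat) : Int) = (j : Int) + 1 := by push_cast; ring
      rw [e]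
      have e2 : ((j : Int) + 1 + 1) = ((j : Int) + 2) := by ring
      rw [e2, slice_shift]
    rw [hmap]
    have hlen : (L.drop c).length = L.length - c := by simp
    have hcond : (L.length = (k + 1) * c) ↔ ((L.drop c).length = k * c) := by
      rw [hlen]
      have hmul : (k + 1) * c = k * c + c := by ring
      constructor <;> intro h <;> omega
    have hdrop : L.drop ((k + 1) * c) = (L.drop c).drop (k * c) := by
      rw [List.drop_drop]
      have hmul : (k + 1) * c = k * c + c := by ring
      congr 1; omega
    have hmul : (k + 1) * c = k * c + c := by ring
    rw [← ih (L.drop c) c hc (by omega) (by omega)]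
    congr 1
    by_cases h : L.length = (k + 1) * c
    · rw [if_pos h, if_pos (hcond.mp h)]
    · rw [if_neg h, if_neg (fun hh => h (hcond.mpr hh)), hdrop]

theorem slice_tail (L : List Int) (a : Int) (ha : 0 ≤ a) :
    PySem.List.slice L (some a) none = L.drop a.toNat :=
  PySem.List.slice_from L ha

-- A's port, on Pre_, equals chunks over the flattened list
theorem A_chunks (L : List Int) (b : Int) (hL : L ≠ []) (hb : 1 ≤ b) :
    bundle_up [L] b = chunks (min (L.length : Int) b).toNat L := by
  have hXf : List.flatMap id [L] = L := by simp
  have hn : 1 ≤ (L.length : Int) := by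
    have := List.length_pos_iff.mpr hL; omega
  set n : Int := (L.length : Int) with hhn
  set bs : Int := min n b with hbs
  have hbs1 : 1 ≤ bs := by omega
  have hbsn : bs ≤ n := by omega
  set k : Int := PySem.Int.floordiv n bs with hk
  set r : Int := PySem.Int.mod n bs with hr
  have hkr : k * bs + r = n := PySem.Int.floordiv_mul_add_mod n bs
  have hr0 : 0 ≤ r := PySem.Int.mod_nonneg n (by omega)
  have hrlt : r < bs := PySem.Int.mod_lt n (by omega)
  have hk1 : 1 ≤ k := by
    have := (PySem.Int.le_floordiv_iff_mul_le (a := n) (b := bs) (q := 1) (by omega)).mpr (by omega)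
    omega
  have hbs0 : (0:Int) < bs := by omega
  have hkbs0 : 0 ≤ k * bs := by nlinarith
  set cN : Nat := bs.toNat with hcN
  set kN : Nat := k.toNat with hkN
  have hbsc : bs = (cN : Int) := by omega
  have hkc : k = (kN : Int) := by omega
  have hcN1 : 1 ≤ cN := by omega
  have hkcN : ((kN : Int)) * ((cN : Int)) = k * bs := by rw [← hkc, ← hbsc]
  have hlow : kN * cN ≤ L.length := by
    have h' : ((kN * cN : Nat) : Int) ≤ ((L.length : Nat) : Int) := by
      push_cast
      rw [hkcN]
      omega
    exact_mod_cast h'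
  have hhigh : L.length < kN * cN + cN := by
    have h' : ((L.length : Nat) : Int) < ((kN * cN + cN : Nat) : Int) := by
      push_cast
      rw [hkcN]
      omega
    exact_mod_cast h'
  simp only [bundle_up, hXf, ← hhn, ← hbs, ← hk]
  rw [PySem.List.foldl_prod_mk
        (f := fun acc i => acc ++ [PySem.List.slice L (some (i * bs)) (some ((i + 1) * bs))])
        (g := fun (_ : Option Int) i => some i),
      foldl_some_pyRange_one 0 k (by omega),
      PySem.List.foldl_append_singleton_eq_map]
  simp only [List.nil_append]
  have e1 : (k - 1 + 1) * bs = k * bs := by ring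
  rw [e1, slice_tail L (k * bs) hkbs0]
  have htoNat : (k * bs).toNat = kN * cN := by
    have : k * bs = ((kN * cN : Nat) : Int) := by push_cast; rw [hkcN]
    omega
  rw [htoNat]
  have hmapconv : (PySem.List.pyRange 0 k 1).map
      (fun i => PySem.List.slice L (some (i * bs)) (some ((i + 1) * bs))) =
      (List.range kN).map (fun (j : Nat) => PySem.List.slice L (some ((j : Int) * (cN : Int))) (some (((j : Int) + 1) * (cN : Int)))) := by
    rw [hkc, PySem.List.pyRange_one]
    simp only [Int.sub_zero, Int.toNat_natCast, List.map_map]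
    apply List.map_congr_left
    intro j _
    simp only [Function.comp, zero_add, hbsc]
  rw [hmapconv]
  rw [← map_slices_chunks kN L cN hcN1 hlow hhigh]
  by_cases h : L.length = kN * cN
  · rw [if_neg (by simp [List.length_drop]; omega), if_pos h]; simp
  · rw [if_pos (by simp [List.length_drop]; omega), if_neg h]

-- ===== VERDICT (by name: the statement is the Claim_ definition above) =====
theorem bundle_up_spec : Claim_equal_bundle_up := by
  intro X b hDom hPre
  unfold Spec_bundle_up
  obtain ⟨hL, hb⟩ := hPre
  set L := X.flatMap id with hLdef
  have hn : 1 ≤ (L.length : Int) := by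
    have := List.length_pos_iff.mpr hL; omega
  set c : Int := min (L.length : Int) b with hc
  have hc1 : 1 ≤ c := by omega
  have hA : bundle_up X b = bundle_up [L] b := by simp [bundle_up, hLdef]
  rw [hA, A_chunks L b hL hb]
  have hcap : (X.map (fun xs => (xs.length : Int))).sum = (L.length : Int) := sum_len X
  have hfun : (fun (s : List (List Int) × List Int) img =>
      if ((s.2 ++ [img]).length : Int) = c then (s.1 ++ [s.2 ++ [img]], ([] : List Int))
      else (s.1, s.2 ++ [img])) = stepB c.toNat := by
    funext s img
    simp only [stepB]
    rw [show ((c.toNat : Nat) : Int) = c from by omega]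
  have hB : bundle_up_alt X b = finB (L.foldl (stepB c.toNat) ([], [])) := by
    simp only [bundle_up_alt, hcap, ← hc, finB]
    rw [foldl_flat, ← hLdef, hfun]
  rw [hB, B_chunks c.toNat (by omega) L]
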